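-- pv_equiv track=rewrite | github.com/henrykptan/project_euler | solutions/complete/70s/79.py | _get_number_mappings
-- ===== SOURCE A (Python) =====
-- from typing import List, Set
--
-- def _get_number_mappings(keylog_entries: List[str]) -> dict[str, set[str]]:
--     mappings = {}
--     for entry in keylog_entries:
--         if entry[0] in mappings:
--             mappings[entry[0]].update([entry[1], entry[2]])
--         else:
--             mappings[entry[0]] = {entry[1], entry[2]}
--         if entry[1] in mappings:
--             mappings[entry[1]].update([entry[2]])
--         else:
--             mappings[entry[1]] = {entry[2]}
--     return mappings
-- ===== SOURCE B (Python) =====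
-- def _get_number_mappings(keylog_entries):
--     # Stage 1: flatten entries into the directed-edge stream.
--     edges = []
--     for e in keylog_entries:
--         edges.append((e[0], e[1]))
--         edges.append((e[0], e[2]))
--         edges.append((e[1], e[2]))
--     # Stage 2: ordered distinct sources.
--     sources = list(dict.fromkeys(s for s, _ in edges))
--     # Stage 3: for each source, re-scan the edge stream for its successors.
--     return {src: {d for s, d in edges if s == src} for src in sources}
-- ===== Notes on version B (the rewrite author's own statement) =====
-- stated objective: alternative
-- what changed: Replaces A's single-pass dict-of-sets accumulation with a staged pipeline that keeps no mutable mapping: flatten to an edge list, dedup the sources in first-occurrence order, then build each source's successor set by re-scanning the whole edge list with a filtering comprehension (O(n*k) nested scans instead of one-pass accumulation).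
import Mathlib
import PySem

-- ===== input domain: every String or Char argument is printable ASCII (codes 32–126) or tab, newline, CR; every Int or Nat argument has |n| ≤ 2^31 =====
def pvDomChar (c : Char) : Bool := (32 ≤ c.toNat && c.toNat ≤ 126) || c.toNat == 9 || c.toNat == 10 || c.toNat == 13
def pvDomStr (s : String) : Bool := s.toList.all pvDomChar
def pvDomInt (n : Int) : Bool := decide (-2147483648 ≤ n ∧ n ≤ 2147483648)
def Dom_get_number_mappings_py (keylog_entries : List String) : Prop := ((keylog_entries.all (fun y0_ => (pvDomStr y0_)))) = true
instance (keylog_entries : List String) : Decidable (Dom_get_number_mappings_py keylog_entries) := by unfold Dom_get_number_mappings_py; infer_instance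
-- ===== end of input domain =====

-- B keeps no mutable mapping: it flattens the entries to an edge list, dedups the
-- sources in first-occurrence order, and rebuilds each source's successor set by
-- re-scanning the edge list (staged nested scans; alternative decomposition, same result).
-- ===== PORT A =====
def get_number_mappings_py (keylog_entries : List String) : List (String × List String) :=
  (keylog_entries.foldl (fun d entry =>
    let d1 :=
      if d.contains ((PySem.Str.pyGet? entry 0).getD ' ').toString then
        d.insert ((PySem.Str.pyGet? entry 0).getD ' ').toString
          (PySem.Set.update (d.getD ((PySem.Str.pyGet? entry 0).getD ' ').toString PySem.Set.empty)
            [((PySem.Str.pyGet? entry 1).getD ' ').toString, ((PySem.Str.pyGet? entry 2).getD ' ').toString])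
      else
        d.insert ((PySem.Str.pyGet? entry 0).getD ' ').toString
          (PySem.Set.ofList [((PySem.Str.pyGet? entry 1).getD ' ').toString, ((PySem.Str.pyGet? entry 2).getD ' ').toString])
    if d1.contains ((PySem.Str.pyGet? entry 1).getD ' ').toString then
      d1.insert ((PySem.Str.pyGet? entry 1).getD ' ').toString
        (PySem.Set.update (d1.getD ((PySem.Str.pyGet? entry 1).getD ' ').toString PySem.Set.empty)
          [((PySem.Str.pyGet? entry 2).getD ' ').toString])
    else
      d1.insert ((PySem.Str.pyGet? entry 1).getD ' ').toString
        (PySem.Set.ofList [((PySem.Str.pyGet? entry 2).getD ' ').toString]))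
    PySem.Dict.empty).items

-- ===== PORT B =====
def get_number_mappings_py_alt (keylog_entries : List String) : List (String × List String) :=
  -- Stage 1: flatten entries into the directed-edge stream (append loop).
  let edges := keylog_entries.foldl (fun acc e =>
      acc ++ [(((PySem.Str.pyGet? e 0).getD ' ').toString, ((PySem.Str.pyGet? e 1).getD ' ').toString),
              (((PySem.Str.pyGet? e 0).getD ' ').toString, ((PySem.Str.pyGet? e 2).getD ' ').toString),
              (((PySem.Str.pyGet? e 1).getD ' ').toString, ((PySem.Str.pyGet? e 2).getD ' ').toString)]) []
  -- Stage 2: ordered distinct sources (dict.fromkeys dedup).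
  let sources := PySem.List.dedup (edges.map (·.1))
  -- Stage 3: dict comprehension; each value re-scans the edge stream.
  (sources.foldl (fun d src =>
      d.insert src (PySem.Set.ofList ((edges.filter (fun p => p.1 == src)).map (·.2))))
    PySem.Dict.empty).items

-- ===== PRECONDITION & SPEC =====
-- Pre_ excludes entries shorter than 3 characters, on which A raises IndexError.
def Pre_get_number_mappings_py (keylog_entries : List String) : Prop :=
  ∀ e ∈ keylog_entries, 3 ≤ (PySem.Str.len e)
instance (keylog_entries : List String) : Decidable (Pre_get_number_mappings_py keylog_entries) := by unfold Pre_get_number_mappings_py; infer_instance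
def pvWitness_get_number_mappings_py : List String := ["319", "680", "180", "690"]

def Spec_get_number_mappings_py (keylog_entries : List String) (out : List (String × List String)) : Prop := out = get_number_mappings_py_alt keylog_entries
instance (keylog_entries : List String) (out : List (String × List String)) : Decidable (Spec_get_number_mappings_py keylog_entries out) := by unfold Spec_get_number_mappings_py; infer_instance

-- ===== CLAIM (what is proved, stated in full; the proofs are below) =====
def Claim_equal_get_number_mappings_py : Prop := ∀ (keylog_entries : List String), Dom_get_number_mappings_py keylog_entries → Pre_get_number_mappings_py keylog_entries → Spec_get_number_mappings_py keylog_entries (get_number_mappings_py keylog_entries)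

-- ===== LEMMAS AND PROOFS =====

-- one edge-insertion step (A's per-entry branches collapse to three of these)
def pvStepB (d : PySem.Dict String (PySem.Set String)) (p : String × String) :
    PySem.Dict String (PySem.Set String) :=
  d.insert p.1 (PySem.Set.add (d.getD p.1 PySem.Set.empty) p.2)

-- A's first per-entry branch is two successive edge insertions
theorem pvFirst_eq (d : PySem.Dict String (PySem.Set String)) (e0 e1 e2 : String) :
    (if d.contains e0 then
        d.insert e0 (PySem.Set.update (d.getD e0 PySem.Set.empty) [e1, e2])
      else
        d.insert e0 (PySem.Set.ofList [e1, e2]))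
      = pvStepB (pvStepB d (e0, e1)) (e0, e2) := by
  have hupd : ∀ s : PySem.Set String,
      PySem.Set.update s [e1, e2] = PySem.Set.add (PySem.Set.add s e1) e2 := by
    intro s; simp [PySem.Set.update]
  by_cases h : d.contains e0 = true
  · simp [h, pvStepB, hupd, PySem.Dict.getD_insert_self, PySem.Dict.insert_insert_self]
  · have h' : d.contains e0 = false := by simpa using h
    have hg : d.getD e0 ([] : PySem.Set String) = [] :=
      PySem.Dict.getD_of_not_contains d [] h'
    simp [h', pvStepB, hg, PySem.Dict.getD_insert_self, PySem.Dict.insert_insert_self,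
      PySem.Set.ofList, PySem.Set.add]

-- A's second per-entry branch is one edge insertion
theorem pvSecond_eq (d : PySem.Dict String (PySem.Set String)) (e1 e2 : String) :
    (if d.contains e1 then
        d.insert e1 (PySem.Set.update (d.getD e1 PySem.Set.empty) [e2])
      else
        d.insert e1 (PySem.Set.ofList [e2]))
      = pvStepB d (e1, e2) := by
  by_cases h : d.contains e1 = true
  · simp [h, pvStepB, PySem.Set.update]
  · have h' : d.contains e1 = false := by simpa using h
    have hg : d.getD e1 ([] : PySem.Set String) = [] :=
      PySem.Dict.getD_of_not_contains d [] h'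
    simp [h', pvStepB, hg, PySem.Set.ofList, PySem.Set.add]

-- A's whole loop is the fold of pvStepB over the flat edge stream
theorem pvDicts_eq (f0 f1 f2 : String → String) (es : List String)
    (d : PySem.Dict String (PySem.Set String)) :
    es.foldl (fun d entry =>
      let d1 :=
        if d.contains (f0 entry) then
          d.insert (f0 entry)
            (PySem.Set.update (d.getD (f0 entry) PySem.Set.empty) [f1 entry, f2 entry])
        else
          d.insert (f0 entry) (PySem.Set.ofList [f1 entry, f2 entry])
      if d1.contains (f1 entry) then
        d1.insert (f1 entry)
          (PySem.Set.update (d1.getD (f1 entry) PySem.Set.empty) [f2 entry])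
      else
        d1.insert (f1 entry) (PySem.Set.ofList [f2 entry])) d
    = (es.flatMap (fun e =>
        [(f0 e, f1 e), (f0 e, f2 e), (f1 e, f2 e)])).foldl pvStepB d := by
  induction es generalizing d with
  | nil => rfl
  | cons e es ih =>
      simp only [List.foldl_cons, List.flatMap_cons, List.foldl_append]
      rw [← ih]
      congr 1
      simp only [List.foldl_nil]
      rw [pvFirst_eq, pvSecond_eq]

-- the value at any key of the edge-stream fold is the filtered successor stream
theorem pvGetD_fold (l : List (String × String)) (d : PySem.Dict String (PySem.Set String))
    (k : String) :
    (l.foldl pvStepB d).getD k PySem.Set.empty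
      = PySem.Set.update (d.getD k PySem.Set.empty) ((l.filter (fun p => p.1 == k)).map (·.2)) := by
  induction l generalizing d with
  | nil => simp [PySem.Set.update]
  | cons p l ih =>
      rw [List.foldl_cons, ih]
      by_cases h : p.1 = k
      · simp [pvStepB, h, PySem.Dict.getD_insert_self, PySem.Set.update]
      · simp [pvStepB, h,
          PySem.Dict.getD_insert_of_ne _ _ _ (fun hk => h hk.symm)]

-- ===== VERDICT (by name: the statement is the Claim_ definition above) =====
theorem get_number_mappings_py_spec : Claim_equal_get_number_mappings_py := by
  intro keylog_entries _ _
  show get_number_mappings_py keylog_entries = get_number_mappings_py_alt keylog_entries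
  unfold get_number_mappings_py get_number_mappings_py_alt
  rw [pvDicts_eq (fun e => ((PySem.Str.pyGet? e 0).getD ' ').toString)
      (fun e => ((PySem.Str.pyGet? e 1).getD ' ').toString)
      (fun e => ((PySem.Str.pyGet? e 2).getD ' ').toString)]
  rw [PySem.List.foldl_append_eq_flatMap]
  simp only [List.nil_append]
  set edges := keylog_entries.flatMap (fun e =>
      [(((PySem.Str.pyGet? e 0).getD ' ').toString, ((PySem.Str.pyGet? e 1).getD ' ').toString),
       (((PySem.Str.pyGet? e 0).getD ' ').toString, ((PySem.Str.pyGet? e 2).getD ' ').toString),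
       (((PySem.Str.pyGet? e 1).getD ' ').toString, ((PySem.Str.pyGet? e 2).getD ' ').toString)]) with hedges
  -- A side: items via keys + getD
  have hndA : (edges.foldl pvStepB PySem.Dict.empty).keys.Nodup := by
    exact PySem.Dict.nodup_keys_foldl_insert_key edges (·.1) _ _ PySem.Dict.nodup_keys_empty
  have hkeysA : (edges.foldl pvStepB PySem.Dict.empty).keys
      = PySem.Set.ofList (edges.map (·.1)) := by
    have := PySem.Dict.keys_foldl_insert_key edges (·.1)
      (fun d x => PySem.Set.add (d.getD x.1 PySem.Set.empty) x.2) PySem.Dict.empty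
    simpa [PySem.Set.update, PySem.Set.ofList, pvStepB] using this
  rw [PySem.Dict.items_eq_map_keys _ hndA PySem.Set.empty, hkeysA]
  -- B side: fresh distinct keys append
  have hsnd : (PySem.List.dedup (edges.map (·.1))).Nodup := PySem.List.nodup_dedup _
  have hB := PySem.Dict.items_foldl_insert_fresh (PySem.List.dedup (edges.map (·.1)))
      (fun s => s)
      (fun src => PySem.Set.ofList ((edges.filter (fun p => p.1 == src)).map (·.2)))
      PySem.Dict.empty
      (by intro a _; exact PySem.Dict.contains_empty a)
      (by simpa using hsnd)
  beta_reduce at hB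
  rw [hB]
  simp only [PySem.Dict.empty, List.nil_append, PySem.List.dedup_eq_ofList]
  apply List.map_congr_left
  intro k _
  rw [pvGetD_fold]
  simp [PySem.Set.update, PySem.Set.ofList, PySem.Dict.getD, PySem.Dict.get?]
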